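-- pv_equiv track=rewrite | github.com/mjalkio/advent-of-code | year_2023/day03/gear_ratios.py | _get_potential_parts
-- ===== SOURCE A (Python) =====
-- def _get_potential_parts(lines):
--     potential_parts = []
--     for line_num, line in enumerate(lines):
--         i = 0
--         while i < len(line):
--             if line[i].isdigit():
--                 num = ""
--                 start = i
--                 while i < len(line) and line[i].isdigit():
--                     num += line[i]
--                     i += 1
--                 end = i
--                 potential_parts.append((num, line_num, start, end))
--             else:
--                 i += 1
--     return potential_parts
-- ===== SOURCE B (Python) =====
-- from itertools import groupby
--
--
-- def _get_potential_parts(lines):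
--     parts = []
--     for line_num, line in enumerate(lines):
--         pos = 0
--         for is_digit, group in groupby(line, key=str.isdigit):
--             chars = list(group)
--             if is_digit:
--                 parts.append(("".join(chars), line_num, pos, pos + len(chars)))
--             pos += len(chars)
--     return parts
-- ===== Notes on version B (the rewrite author's own statement) =====
-- stated objective: idiomatic
-- what changed: Replaces the manual nested-while index scanning with an itertools.groupby(line, key=str.isdigit) traversal where each span's start/end come from an accumulated position offset.
import Mathlib
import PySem

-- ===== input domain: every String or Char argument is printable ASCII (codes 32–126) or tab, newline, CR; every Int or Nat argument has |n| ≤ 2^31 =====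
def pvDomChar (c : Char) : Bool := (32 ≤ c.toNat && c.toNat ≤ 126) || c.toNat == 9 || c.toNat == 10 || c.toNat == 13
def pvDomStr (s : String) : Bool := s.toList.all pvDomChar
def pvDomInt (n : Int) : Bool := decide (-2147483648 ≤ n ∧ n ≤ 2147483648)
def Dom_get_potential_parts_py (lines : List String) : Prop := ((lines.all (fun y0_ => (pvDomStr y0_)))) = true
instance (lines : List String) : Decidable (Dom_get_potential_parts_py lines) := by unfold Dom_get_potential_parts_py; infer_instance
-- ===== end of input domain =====

-- B replaces A's manual index/while scanning with an itertools.groupby-style grouped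
-- traversal (an idiomatic decomposition; same cost, same return value).

-- ===== PORT A =====
-- inner while loop: `while i < len(line) and line[i].isdigit(): num += line[i]; i += 1`
-- (recursion over the remaining suffix of the line, index i carried alongside)
def pvA_take (cs : List Char) (num : String) (i : Nat) : String × Nat × List Char :=
  match cs with
  | [] => (num, i, [])
  | c :: rest =>
    if PySem.Chars.isdigit c then pvA_take rest (num.push c) (i + 1)
    else (num, i, c :: rest)

theorem pvA_take_len (cs : List Char) (num : String) (i : Nat) :
    (pvA_take cs num i).2.2.length ≤ cs.length := by
  induction cs generalizing num i with
  | nil => simp [pvA_take]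
  | cons c rest ih =>
    simp only [pvA_take]
    split
    · exact le_trans (ih _ _) (Nat.le_succ _)
    · simp

-- outer while loop over i (the first digit of a run is consumed on entering the inner while)
def pvA_scan (line_num : Int) (cs : List Char) (i : Nat)
    (acc : List (String × Int × Int × Int)) : List (String × Int × Int × Int) :=
  match h : cs with
  | [] => acc
  | c :: rest =>
    if PySem.Chars.isdigit c then
      let t := pvA_take rest ((("" : String)).push c) (i + 1)
      pvA_scan line_num t.2.2 t.2.1 (acc ++ [(t.1, line_num, (i : Int), (t.2.1 : Int))])
    else
      pvA_scan line_num rest (i + 1) acc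
termination_by cs.length
decreasing_by
  · exact Nat.lt_succ_of_le (pvA_take_len rest _ _)
  · simp

-- `for line_num, line in enumerate(lines)` with the shared accumulator potential_parts
def pvA_outer (ls : List String) (line_num : Int)
    (acc : List (String × Int × Int × Int)) : List (String × Int × Int × Int) :=
  match ls with
  | [] => acc
  | l :: ls' => pvA_outer ls' (line_num + 1) (pvA_scan line_num l.toList 0 acc)

def get_potential_parts_py (lines : List String) : List (String × Int × Int × Int) :=
  pvA_outer lines 0 []

-- ===== PORT B =====
-- itertools.groupby(line, key=str.isdigit): maximal runs of equal key, each with its key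
def pvB_groups (cs : List Char) : List (Bool × List Char) :=
  match cs with
  | [] => []
  | c :: rest =>
    let k := PySem.Chars.isdigit c
    (k, c :: rest.takeWhile (fun d => PySem.Chars.isdigit d == k)) ::
      pvB_groups (rest.dropWhile (fun d => PySem.Chars.isdigit d == k))
termination_by cs.length
decreasing_by exact Nat.lt_succ_of_le (List.length_dropWhile_le _ rest)

-- inner for loop of B: running position offset, emit a tuple for each digit group
def pvB_line (line_num : Int) (gs : List (Bool × List Char)) (pos : Nat) :
    List (String × Int × Int × Int) :=
  match gs with
  | [] => []
  | (k, g) :: gs' =>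
    (if k then [(String.ofList g, line_num, (pos : Int), ((pos + g.length : Nat) : Int))] else [])
      ++ pvB_line line_num gs' (pos + g.length)

def get_potential_parts_py_alt (lines : List String) : List (String × Int × Int × Int) :=
  ((lines.zipIdx).map (fun p => pvB_line (p.2 : Int) (pvB_groups p.1.toList) 0)).flatten

-- ===== PRECONDITION & SPEC =====
def Spec_get_potential_parts_py (lines : List String) (out : List (String × Int × Int × Int)) : Prop := out = get_potential_parts_py_alt lines
instance (lines : List String) (out : List (String × Int × Int × Int)) : Decidable (Spec_get_potential_parts_py lines out) := by unfold Spec_get_potential_parts_py; infer_instance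

-- ===== CLAIM (what is proved, stated in full; the proofs are below) =====
def Claim_equal_get_potential_parts_py : Prop := ∀ (lines : List String), Dom_get_potential_parts_py lines → Spec_get_potential_parts_py lines (get_potential_parts_py lines)

-- ===== LEMMAS AND PROOFS =====

theorem pvA_take_eq (cs : List Char) (num : String) (i : Nat) :
    pvA_take cs num i =
      (num ++ String.ofList (cs.takeWhile PySem.Chars.isdigit),
       i + (cs.takeWhile PySem.Chars.isdigit).length,
       cs.dropWhile PySem.Chars.isdigit) := by
  induction cs generalizing num i with
  | nil => simp [pvA_take]
  | cons c rest ih =>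
    by_cases h : PySem.Chars.isdigit c
    · simp only [pvA_take, h, if_pos, List.takeWhile_cons_of_pos, List.dropWhile_cons_of_pos, ih]
      have hnum : num.push c ++ String.ofList (rest.takeWhile PySem.Chars.isdigit)
          = num ++ String.ofList (c :: rest.takeWhile PySem.Chars.isdigit) := by
        apply String.toList_inj.mp; simp
      rw [hnum]
      refine Prod.ext rfl (Prod.ext ?_ rfl)
      simp only [List.length_cons]
      omega
    · have h' : PySem.Chars.isdigit c = false := by simpa using h
      simp [pvA_take, h', List.takeWhile_cons_of_neg, List.dropWhile_cons_of_neg]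

theorem pvB_line_skip_nondigit (line_num : Int) (c : Char) (rest : List Char) (i : Nat)
    (hc : PySem.Chars.isdigit c = false) :
    pvB_line line_num (pvB_groups (c :: rest)) i
      = pvB_line line_num (pvB_groups rest) (i + 1) := by
  rw [pvB_groups]
  simp only [hc]
  cases rest with
  | nil => simp [pvB_line, pvB_groups]
  | cons d t =>
    by_cases hd : PySem.Chars.isdigit d
    · -- rest starts a new (digit) group: the false-group is just [c]
      simp [pvB_line, hd, List.takeWhile_cons_of_neg, List.dropWhile_cons_of_neg]
    · -- rest extends the false-group
      have hd' : PySem.Chars.isdigit d = false := by simpa using hd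
      conv_rhs => rw [pvB_groups]
      simp only [hd', pvB_line]
      rw [List.takeWhile_cons_of_pos (by simp [hd']),
          List.dropWhile_cons_of_pos (by simp [hd'])]
      simp only [Bool.false_eq_true, if_false, List.nil_append, List.length_cons]
      congr 1
      omega

theorem pvA_scan_eq (line_num : Int) (cs : List Char) (i : Nat)
    (acc : List (String × Int × Int × Int)) :
    pvA_scan line_num cs i acc = acc ++ pvB_line line_num (pvB_groups cs) i := by
  induction hn : cs.length using Nat.strong_induction_on generalizing cs i acc with
  | _ n ih =>
  cases cs with
  | nil => simp [pvA_scan, pvB_groups, pvB_line]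
  | cons c rest =>
    by_cases hc : PySem.Chars.isdigit c
    · rw [pvA_scan]
      simp only [hc, if_pos, pvA_take_eq]
      have hlt : (rest.dropWhile PySem.Chars.isdigit).length < n := by
        subst hn
        exact Nat.lt_succ_of_le (List.length_dropWhile_le _ rest)
      rw [ih _ hlt _ _ _ rfl]
      rw [pvB_groups]
      simp only [hc, pvB_line]
      have htw : (rest.takeWhile fun d => PySem.Chars.isdigit d == true)
          = rest.takeWhile PySem.Chars.isdigit := by simp
      have hdw : (rest.dropWhile fun d => PySem.Chars.isdigit d == true)
          = rest.dropWhile PySem.Chars.isdigit := by simp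
      rw [htw, hdw]
      have hstr : (("" : String)).push c ++ String.ofList (rest.takeWhile PySem.Chars.isdigit)
          = String.ofList (c :: rest.takeWhile PySem.Chars.isdigit) :=
        String.toList_inj.mp (by simp)
      have hlen : i + 1 + (rest.takeWhile PySem.Chars.isdigit).length
          = i + (c :: rest.takeWhile PySem.Chars.isdigit).length := by
        simp only [List.length_cons]; omega
      rw [hstr, hlen, List.append_assoc]
      simp
    · have hc' : PySem.Chars.isdigit c = false := by simpa using hc
      rw [pvA_scan]
      simp only [hc', if_neg, Bool.false_eq_true, not_false_eq_true]
      have hlt : rest.length < n := by subst hn; simp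
      rw [ih _ hlt _ _ _ rfl, pvB_line_skip_nondigit line_num c rest i hc']

theorem pvA_outer_eq (ls : List String) (k : Nat) (acc : List (String × Int × Int × Int)) :
    pvA_outer ls (k : Int) acc =
      acc ++ ((ls.zipIdx k).map (fun p => pvB_line (p.2 : Int) (pvB_groups p.1.toList) 0)).flatten := by
  induction ls generalizing k acc with
  | nil => simp [pvA_outer]
  | cons l ls' ih =>
    rw [pvA_outer, pvA_scan_eq]
    have : ((k : Int) + 1) = ((k + 1 : Nat) : Int) := by push_cast; ring
    rw [this, ih]
    simp [List.zipIdx_cons]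

-- ===== VERDICT (by name: the statement is the Claim_ definition above) =====
theorem get_potential_parts_py_spec : Claim_equal_get_potential_parts_py := by
  intro lines _
  unfold Spec_get_potential_parts_py get_potential_parts_py get_potential_parts_py_alt
  have := pvA_outer_eq lines 0 []
  simpa using this
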